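-- pv_equiv track=rewrite | github.com/anniegmatic/Zadania-maturalne | Matura maj 2023 (formuła 2015)/Zadanie 4/4,3.py | wakacyjne
-- ===== SOURCE A (Python) =====
-- def wakacyjne(tab):
--     wynik = ""
--
--     for x in tab:
--         wykreslenia = [len(x)]
--         lista = ["w","a","k","a","c","j","e"]
--         j = 0
--         wyciete = 0
--
--         for i in range(len(x)):
--             if x[i] == lista[j]:
--                 if j == len(lista) - 1:
--                     wykreslenia.append(len(x) - i - 1 + wyciete)
--                     j = -1
--                 j += 1
--             else:
--                 wyciete += 1
--
--         wynik += str(min(wykreslenia)) + " "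
--
--     return wynik
-- ===== SOURCE B (Python) =====
-- PAT = "wakacje"
--
-- def _after(s, ch):
--     # suffix of s strictly after the first occurrence of ch, or None
--     for i in range(len(s)):
--         if s[i] == ch:
--             return s[i + 1:]
--     return None
--
-- def _strip_once(s):
--     # remainder after removing one whole 'wakacje' subsequence occurrence, or None
--     for ch in PAT:
--         if s is None:
--             return None
--         s = _after(s, ch)
--     return s
--
-- def wakacyjne(tab):
--     wynik = ""
--     for x in tab:
--         k = 0
--         s = x
--         while True:
--             t = _strip_once(s)
--             if t is None:
--                 break
--             k += 1
--             s = t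
--         wynik += str(len(x) - 7 * k) + " "
--     return wynik
-- ===== Notes on version B (the rewrite author's own statement) =====
-- stated objective: alternative
-- what changed: Instead of A's single left-to-right pass maintaining a pattern pointer, a deletion counter and a list of candidates minimized at the end, B repeatedly strips one whole 'wakacje' subsequence occurrence from the string (find-next-letter + take-suffix for each of the 7 letters), counts the strips, and outputs len(x) - 7*strips.
import Mathlib
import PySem

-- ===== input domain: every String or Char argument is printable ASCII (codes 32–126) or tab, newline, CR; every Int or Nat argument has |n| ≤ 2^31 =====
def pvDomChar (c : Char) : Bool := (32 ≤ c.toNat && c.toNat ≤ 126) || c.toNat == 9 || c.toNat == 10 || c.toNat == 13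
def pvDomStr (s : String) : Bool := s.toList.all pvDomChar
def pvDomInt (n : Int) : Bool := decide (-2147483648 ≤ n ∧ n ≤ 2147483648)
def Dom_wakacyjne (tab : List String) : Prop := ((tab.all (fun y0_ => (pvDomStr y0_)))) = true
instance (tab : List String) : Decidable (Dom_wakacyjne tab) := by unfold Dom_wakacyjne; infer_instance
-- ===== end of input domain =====

-- B replaces A's single pass (pattern pointer + candidate list + min) by repeatedly stripping
-- one whole 'wakacje' subsequence occurrence and counting the strips; objective: alternative.

-- ===== PORT A =====
-- Literal port of A. x[i] is ported with the total pyGetD (the index i from range(len(x)) is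
-- always in range, so it is exact); lista[j] likewise (j stays in 0..6); min(wykreslenia) is
-- ported with min? + getD 0 (wykreslenia starts as [len(x)], so it is never empty).
def wakacyjne (tab : List String) : String :=
  tab.foldl (fun wynik x =>
    let n : Int := PySem.Str.len x
    let lista : List Char := ['w', 'a', 'k', 'a', 'c', 'j', 'e']
    let st :=
      (PySem.List.pyRange 0 n 1).foldl
        (fun (st : List Int × Int × Int) i =>
          if PySem.List.pyGetD x.toList i ' ' = PySem.List.pyGetD lista st.2.1 ' ' then
            if st.2.1 = (lista.length : Int) - 1 then
              (st.1 ++ [n - i - 1 + st.2.2], -1 + 1, st.2.2)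
            else (st.1, st.2.1 + 1, st.2.2)
          else (st.1, st.2.1, st.2.2 + 1))
        ([n], 0, 0)
    wynik ++ PySem.Int.toStr ((PySem.List.min? st.1 id).getD 0) ++ " ")
    ""

-- ===== PORT B =====
-- Port of Source B. _after's enumerate loop (return suffix after first occurrence, else None)
-- is ported by hand as the structural recursion afterChar — exact: first match wins.
def afterChar : List Char → Char → Option (List Char)
  | [], _ => none
  | c :: cs, ch => if c = ch then some cs else afterChar cs ch

-- _strip_once: for ch in PAT: s = _after(s, ch) with None propagation = foldl with Option.bind.
def stripOnce (s : List Char) : Option (List Char) :=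
  ("wakacje".toList).foldl (fun acc ch => acc.bind (fun t => afterChar t ch)) (some s)

-- (termination helpers for cyclesB; the port cites them in decreasing_by)
theorem afterChar_length {s t : List Char} {ch : Char} (h : afterChar s ch = some t) :
    t.length < s.length := by
  induction s with
  | nil => simp [afterChar] at h
  | cons c cs ih =>
    simp only [afterChar] at h
    split at h
    · cases h; simp
    · exact Nat.lt_trans (ih h) (by simp)

theorem foldl_bind_none (ps : List Char) :
    ps.foldl (fun acc ch => acc.bind (fun t => afterChar t ch)) none = none := by
  induction ps with
  | nil => rfl
  | cons p ps ih => simpa using ih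

theorem foldl_bind_le (ps : List Char) : ∀ (s t : List Char),
    ps.foldl (fun acc ch => acc.bind (fun t => afterChar t ch)) (some s) = some t →
    t.length ≤ s.length := by
  induction ps with
  | nil => intro s t h; cases h; exact le_rfl
  | cons p ps ih =>
    intro s t h
    simp only [List.foldl_cons, Option.bind_some] at h
    cases hu : afterChar s p with
    | none => rw [hu] at h; rw [foldl_bind_none] at h; cases h
    | some u =>
      rw [hu] at h
      exact le_of_lt (Nat.lt_of_le_of_lt (ih u t h) (afterChar_length hu))

theorem stripOnce_length {s t : List Char} (h : stripOnce s = some t) :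
    t.length < s.length := by
  unfold stripOnce at h
  rw [show ("wakacje".toList) = 'w' :: ['a', 'k', 'a', 'c', 'j', 'e'] from rfl] at h
  rw [List.foldl_cons, Option.bind_some] at h
  cases hu : afterChar s 'w' with
  | none => rw [hu] at h; rw [foldl_bind_none] at h; cases h
  | some u =>
    rw [hu] at h
    exact Nat.lt_of_le_of_lt (foldl_bind_le _ u t h) (afterChar_length hu)

-- the while loop of Source B: count strips until _strip_once fails
def cyclesB (s : List Char) : Nat :=
  match h : stripOnce s with
  | none => 0
  | some t => 1 + cyclesB t
termination_by s.length
decreasing_by exact stripOnce_length h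

def wakacyjne_alt (tab : List String) : String :=
  tab.foldl (fun wynik x =>
    wynik ++ PySem.Int.toStr (PySem.Str.len x - 7 * (cyclesB x.toList : Int)) ++ " ") ""

-- ===== PRECONDITION & SPEC =====
def Spec_wakacyjne (tab : List String) (out : String) : Prop := out = wakacyjne_alt tab
instance (tab : List String) (out : String) : Decidable (Spec_wakacyjne tab out) := by unfold Spec_wakacyjne; infer_instance

-- ===== CLAIM (what is proved, stated in full; the proofs are below) =====
def Claim_equal_wakacyjne : Prop := ∀ (tab : List String), Dom_wakacyjne tab → Spec_wakacyjne tab (wakacyjne tab)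

-- ===== LEMMAS AND PROOFS =====

-- A's loop state, named for the proofs (definitionally the lambdas of port A), plus the
-- proof-side single-pass counter (j, k) that both sides are reduced to.
def pvLista : List Char := ['w', 'a', 'k', 'a', 'c', 'j', 'e']

def pvAStep (n : Int) (st : List Int × Int × Int) (i : Int) (c : Char) : List Int × Int × Int :=
  if c = PySem.List.pyGetD pvLista st.2.1 ' ' then
    if st.2.1 = (pvLista.length : Int) - 1 then
      (st.1 ++ [n - i - 1 + st.2.2], -1 + 1, st.2.2)
    else (st.1, st.2.1 + 1, st.2.2)
  else (st.1, st.2.1, st.2.2 + 1)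

def pvBStep (s : Nat × Nat) (c : Char) : Nat × Nat :=
  if c = ("wakacje".toList).getD s.1 ' ' then
    if s.1 + 1 = 7 then (0, s.2 + 1) else (s.1 + 1, s.2)
  else s

-- A's inner loop as a structural recursion over the characters with an index counter.
def pvAGo (n : Int) : List Char → Nat → (List Int × Int × Int) → (List Int × Int × Int)
  | [], _, st => st
  | c :: cs, p, st => pvAGo n cs (p + 1) (pvAStep n st p c)

-- The wykreslenia list after k completed cycles.
def pvW (n : Int) (k : Nat) : List Int :=
  n :: (List.range k).map (fun t => n - 7 * ((t : Int) + 1))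

def pvInnerA (x : String) : String :=
  let n : Int := PySem.Str.len x
  let st :=
    (PySem.List.pyRange 0 n 1).foldl
      (fun (st : List Int × Int × Int) i => pvAStep n st i (PySem.List.pyGetD x.toList i ' '))
      ([n], 0, 0)
  PySem.Int.toStr ((PySem.List.min? st.1 id).getD 0)

lemma pvA_eq_fold (tab : List String) :
    wakacyjne tab = tab.foldl (fun w x => w ++ pvInnerA x ++ " ") "" := rfl

-- Bridging A's index loop (range + pyGetD) to the structural recursion pvAGo.
lemma pvBridge (n : Int) (xs : List Char) : ∀ (pre : List Char) (init : List Int × Int × Int),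
    (PySem.List.pyRange (pre.length : Int) ((pre.length : Int) + xs.length) 1).foldl
      (fun st i => pvAStep n st i (PySem.List.pyGetD (pre ++ xs) i ' ')) init
    = pvAGo n xs pre.length init := by
  induction xs with
  | nil => intro pre init; simp [PySem.List.pyRange_one_eq_nil, pvAGo]
  | cons c cs ih =>
    intro pre init
    rw [PySem.List.pyRange_one_cons (by push_cast [List.length_cons]; omega)]
    simp only [List.foldl_cons]
    have hget : PySem.List.pyGetD (pre ++ c :: cs) (pre.length : Int) ' ' = c := by
      rw [PySem.List.pyGetD_natCast]
      simp [List.getD_eq_getElem?_getD]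
    rw [hget]
    have h1 : (pre.length : Int) + 1 = (((pre ++ [c]).length : Nat) : Int) := by
      simp
    have h2 : (pre.length : Int) + ((c :: cs).length : Int)
        = (((pre ++ [c]).length : Nat) : Int) + (cs.length : Int) := by
      simp [List.length_cons]; ring
    have h3 : pre ++ c :: cs = (pre ++ [c]) ++ cs := by simp
    rw [h1, h2, h3, ih (pre ++ [c])]
    simp [pvAGo]

lemma pvW_succ (n : Int) (k : Nat) :
    pvW n k ++ [n - 7 * ((k : Int) + 1)] = pvW n (k + 1) := by
  simp [pvW, List.range_succ]

lemma pvMinW (n : Int) (k : Nat) :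
    PySem.List.min? (pvW n k) id = some (n - 7 * (k : Int)) := by
  induction k with
  | zero => simp [pvW, PySem.List.min?]
  | succ k ih =>
    rw [← pvW_succ]
    simp only [PySem.List.min?, List.foldl_append] at ih ⊢
    rw [ih]
    simp only [List.foldl_cons, List.foldl_nil, id]
    rw [if_pos (by omega)]
    push_cast; ring_nf

-- The A-side invariant: A's state after processing the characters equals the single-pass
-- counter (j, k), with wykreslenia = pvW n k and wyciete = processed - 7k - j.
lemma pvMain (n : Int) (xs : List Char) : ∀ (p k j : Nat), j < 7 →
    pvAGo n xs p (pvW n k, (j : Int), (p : Int) - 7 * k - j)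
    = (pvW n (xs.foldl pvBStep (j, k)).2,
       ((xs.foldl pvBStep (j, k)).1 : Int),
       ((p : Int) + xs.length) - 7 * ((xs.foldl pvBStep (j, k)).2 : Int) - ((xs.foldl pvBStep (j, k)).1 : Int)) := by
  induction xs with
  | nil => intro p k j hj; simp [pvAGo]
  | cons c cs ih =>
    intro p k j hj
    simp only [pvAGo, List.foldl_cons]
    have hpat : PySem.List.pyGetD pvLista (j : Int) ' ' = ("wakacje".toList).getD j ' ' := by
      rw [PySem.List.pyGetD_natCast]
      rfl
    by_cases hc : c = ("wakacje".toList).getD j ' '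
    · by_cases hj6 : j = 6
      · have hstep : pvAStep n (pvW n k, (j : Int), (p : Int) - 7 * k - j) p c
            = (pvW n (k + 1), ((0 : Nat) : Int), (((p + 1 : Nat) : Int)) - 7 * ((k + 1 : Nat) : Int) - ((0 : Nat) : Int)) := by
          simp only [pvAStep, hpat]
          rw [if_pos hc, if_pos (by simp [pvLista, hj6])]
          rw [show n - (p : Int) - 1 + ((p : Int) - 7 * k - j) = n - 7 * ((k : Int) + 1) by
            rw [hj6]; push_cast; ring]
          rw [pvW_succ]
          exact congrArg₂ Prod.mk rfl (congrArg₂ Prod.mk (by omega) (by omega))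
        have hb : pvBStep (j, k) c = (0, k + 1) := by
          simp only [pvBStep]
          rw [if_pos hc, if_pos (by omega)]
        rw [hstep, hb, ih (p + 1) (k + 1) 0 (by omega)]
        exact congrArg₂ Prod.mk rfl (congrArg₂ Prod.mk rfl (by push_cast [List.length_cons]; ring))
      · have hstep : pvAStep n (pvW n k, (j : Int), (p : Int) - 7 * k - j) p c
            = (pvW n k, (((j + 1 : Nat)) : Int), (((p + 1 : Nat) : Int)) - 7 * ((k : Nat) : Int) - ((j + 1 : Nat) : Int)) := by
          simp only [pvAStep, hpat]
          rw [if_pos hc, if_neg (by simp only [pvLista]; simp; omega)]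
          exact congrArg₂ Prod.mk rfl (congrArg₂ Prod.mk (by omega) (by omega))
        have hb : pvBStep (j, k) c = (j + 1, k) := by
          simp only [pvBStep]
          rw [if_pos hc, if_neg (by omega)]
        rw [hstep, hb, ih (p + 1) k (j + 1) (by omega)]
        exact congrArg₂ Prod.mk rfl (congrArg₂ Prod.mk rfl (by push_cast [List.length_cons]; ring))
    · have hstep : pvAStep n (pvW n k, (j : Int), (p : Int) - 7 * k - j) p c
          = (pvW n k, ((j : Nat) : Int), (((p + 1 : Nat) : Int)) - 7 * ((k : Nat) : Int) - ((j : Nat) : Int)) := by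
        simp only [pvAStep, hpat]
        rw [if_neg hc]
        exact congrArg₂ Prod.mk rfl (congrArg₂ Prod.mk rfl (by omega))
      have hb : pvBStep (j, k) c = (j, k) := by
        simp only [pvBStep]
        rw [if_neg hc]
      rw [hstep, hb, ih (p + 1) k j hj]
      exact congrArg₂ Prod.mk rfl (congrArg₂ Prod.mk rfl (by push_cast [List.length_cons]; ring))

-- ===== the new B-side lemmas: the strip-count equals the single-pass counter =====

def pvMatchFrom (s : List Char) (j : Nat) : Option (List Char) :=
  (pvLista.drop j).foldl (fun acc ch => acc.bind (fun t => afterChar t ch)) (some s)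

def pvCyclesFrom (s : List Char) (j : Nat) : Nat :=
  match pvMatchFrom s j with
  | none => 0
  | some t => 1 + cyclesB t

lemma pvStripOnce_eq (s : List Char) : stripOnce s = pvMatchFrom s 0 := rfl

lemma pvCyclesB_eq (s : List Char) : cyclesB s = pvCyclesFrom s 0 := by
  rw [cyclesB, pvCyclesFrom, pvStripOnce_eq]
  cases hm : pvMatchFrom s 0 <;> simp

lemma pvLista_drop (j : Nat) (hj : j < 7) :
    pvLista.drop j = ("wakacje".toList).getD j ' ' :: pvLista.drop (j + 1) := by
  interval_cases j <;> rfl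

lemma pvMatchFrom_nil (j : Nat) (hj : j < 7) : pvMatchFrom [] j = none := by
  unfold pvMatchFrom
  rw [pvLista_drop j hj]
  simp only [List.foldl_cons, Option.bind_some, afterChar]
  exact foldl_bind_none _

lemma pvMatchFrom_cons_hit (c : Char) (s : List Char) (j : Nat) (hj : j < 7)
    (hc : c = ("wakacje".toList).getD j ' ') :
    pvMatchFrom (c :: s) j
      = (pvLista.drop (j + 1)).foldl (fun acc ch => acc.bind (fun t => afterChar t ch)) (some s) := by
  unfold pvMatchFrom
  rw [pvLista_drop j hj]
  simp [afterChar, hc]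

lemma pvMatchFrom_cons_miss (c : Char) (s : List Char) (j : Nat) (hj : j < 7)
    (hc : ¬ c = ("wakacje".toList).getD j ' ') :
    pvMatchFrom (c :: s) j = pvMatchFrom s j := by
  unfold pvMatchFrom
  rw [pvLista_drop j hj]
  rw [show ("wakacje".toList) = pvLista from rfl] at hc
  simp only [List.foldl_cons, Option.bind_some, afterChar]
  rw [if_neg (by simpa [pvLista, List.getD] using hc)]

-- the strip-count from pattern position j equals what the single-pass counter adds
lemma pvCount (s : List Char) : ∀ (j k : Nat), j < 7 →
    (s.foldl pvBStep (j, k)).2 = k + pvCyclesFrom s j := by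
  induction s with
  | nil =>
    intro j k hj
    simp [pvCyclesFrom, pvMatchFrom_nil j hj]
  | cons c s ih =>
    intro j k hj
    simp only [List.foldl_cons]
    by_cases hc : c = ("wakacje".toList).getD j ' '
    · by_cases hj6 : j = 6
      · have hb : pvBStep (j, k) c = (0, k + 1) := by
          simp only [pvBStep]; rw [if_pos hc, if_pos (by omega)]
        rw [hb, ih 0 (k + 1) (by omega)]
        have hm : pvMatchFrom (c :: s) j = some s := by
          rw [pvMatchFrom_cons_hit c s j hj hc, hj6]
          rfl
        rw [show pvCyclesFrom (c :: s) j = 1 + cyclesB s by simp [pvCyclesFrom, hm]]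
        rw [pvCyclesB_eq]
        omega
      · have hb : pvBStep (j, k) c = (j + 1, k) := by
          simp only [pvBStep]; rw [if_pos hc, if_neg (by omega)]
        rw [hb, ih (j + 1) k (by omega)]
        have hm : pvCyclesFrom (c :: s) j = pvCyclesFrom s (j + 1) := by
          unfold pvCyclesFrom
          rw [pvMatchFrom_cons_hit c s j hj hc]
          rfl
        rw [hm]
    · have hb : pvBStep (j, k) c = (j, k) := by
        simp only [pvBStep]; rw [if_neg hc]
      rw [hb, ih j k hj]
      rw [show pvCyclesFrom (c :: s) j = pvCyclesFrom s j by
        unfold pvCyclesFrom; rw [pvMatchFrom_cons_miss c s j hj hc]]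

-- Per string the two ports produce the same token.
lemma pvInner_eq (x : String) :
    pvInnerA x = PySem.Int.toStr (PySem.Str.len x - 7 * (cyclesB x.toList : Int)) := by
  simp only [pvInnerA, PySem.Str.len_eq]
  have hbr := pvBridge ((x.toList.length : Int)) x.toList []
    ([((x.toList.length : Nat) : Int)], 0, 0)
  simp only [List.length_nil, Nat.cast_zero, List.nil_append, zero_add] at hbr
  rw [hbr]
  have h0 : (([((x.toList.length : Nat) : Int)], (0 : Int), (0 : Int)) : List Int × Int × Int)
      = (pvW (x.toList.length : Int) 0, ((0 : Nat) : Int),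
         ((0 : Nat) : Int) - 7 * ((0 : Nat) : Int) - ((0 : Nat) : Int)) := by
    simp [pvW]
  rw [h0, pvMain (x.toList.length : Int) x.toList 0 0 0 (by omega), pvMinW]
  rw [pvCount x.toList 0 0 (by omega), ← pvCyclesB_eq]
  simp

lemma pvFold (tab : List String) : ∀ (init : String),
    tab.foldl (fun w x => w ++ pvInnerA x ++ " ") init
    = tab.foldl (fun w x =>
        w ++ PySem.Int.toStr (PySem.Str.len x - 7 * (cyclesB x.toList : Int)) ++ " ") init := by
  intro init
  simp only [pvInner_eq]

-- ===== VERDICT (by name: the statement is the Claim_ definition above) =====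
theorem wakacyjne_spec : Claim_equal_wakacyjne := by
  intro tab _
  unfold Spec_wakacyjne wakacyjne_alt
  rw [pvA_eq_fold]
  exact pvFold tab ""
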